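-- pv_equiv track=rewrite | github.com/StanleyTack/AOC2024 | day10/code.py | count_unique_peaks_per_start
-- ===== SOURCE A (Python) =====
-- def count_unique_peaks_per_start(paths):
--     """
--     Processes a list of paths to count the number of unique peaks each starting point can reach.
--     Each end point (peak) is only counted once per starting point, regardless of the number of paths connecting them.
--
--     Parameters:
--         paths (List[List[Tuple[int, int]]]): List of paths, where each path is a list of (x, y) coordinates.
--
--     Returns:
--         Dict[Tuple[int, int], int]: A dictionary mapping each starting point to the number of unique peaks it can reach.
--     """
--     from collections import defaultdict
--
--     # Dictionary to map start points to a set of unique peaks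
--     start_to_peaks = defaultdict(set)
--
--     for path in paths:
--         if not path:
--             continue  # Skip empty paths
--
--         start_point = path[0]
--         end_point = path[-1]
--
--         # Add the end_point to the set of peaks for the start_point
--         start_to_peaks[start_point].add(end_point)
--
--     # Convert the sets to counts
--     start_to_peak_counts = {start: len(peaks) for start, peaks in start_to_peaks.items()}
--     return start_to_peak_counts
-- ===== SOURCE B (Python) =====
-- def count_unique_peaks_per_start(paths):
--     """Staged re-implementation: (1) project the paths to a flat list of
--     (start, end) pairs, (2) list the start points in order of first
--     appearance, (3) for each start, scan the pair list once collecting its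
--     distinct ends in a set and record its size."""
--     pairs = [(p[0], p[-1]) for p in paths if p]
--     starts = []
--     for s, _ in pairs:
--         if s not in starts:
--             starts.append(s)
--     return {s: len({e for t, e in pairs if t == s}) for s in starts}
-- ===== Notes on version B (the rewrite author's own statement) =====
-- stated objective: alternative
-- what changed: Replaces A's single-pass dict-of-sets grouping with a staged pipeline: project paths to a flat (start,end) pair list, extract starts in first-seen order, then for each start do a separate scan of the pair list counting its distinct ends (nested scans instead of incremental grouping).
import Mathlib
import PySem

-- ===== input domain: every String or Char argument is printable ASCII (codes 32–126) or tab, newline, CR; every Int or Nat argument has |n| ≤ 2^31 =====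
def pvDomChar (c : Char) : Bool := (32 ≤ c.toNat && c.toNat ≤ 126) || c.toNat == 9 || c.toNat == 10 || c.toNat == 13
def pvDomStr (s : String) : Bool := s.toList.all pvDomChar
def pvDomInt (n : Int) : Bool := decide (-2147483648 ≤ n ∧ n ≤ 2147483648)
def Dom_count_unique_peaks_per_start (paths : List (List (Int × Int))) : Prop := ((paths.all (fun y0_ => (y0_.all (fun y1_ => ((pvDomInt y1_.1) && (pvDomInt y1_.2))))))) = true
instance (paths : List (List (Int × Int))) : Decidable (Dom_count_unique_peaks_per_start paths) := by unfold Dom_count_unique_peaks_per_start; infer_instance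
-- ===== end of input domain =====

-- B replaces A's single-pass dict-of-sets grouping with a staged pipeline
-- (pair projection, first-seen start list, a per-start scan over the pairs).

-- ===== PORT A =====
-- for path in paths: skip empty; start_to_peaks[path[0]].add(path[-1])  (defaultdict(set))
def pvStepA (d : PySem.Dict (Int × Int) (PySem.Set (Int × Int)))
    (path : List (Int × Int)) : PySem.Dict (Int × Int) (PySem.Set (Int × Int)) :=
  match path with
  | [] => d
  | p :: ps =>
      let start_point := p                       -- path[0] of a non-empty list
      let end_point := (ps.getLast?.getD p)      -- path[-1] of a non-empty list
      d.insert start_point (PySem.Set.add (d.getD start_point PySem.Set.empty) end_point)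

def count_unique_peaks_per_start (paths : List (List (Int × Int))) : List (Int × Int × Int) :=
  let start_to_peaks := paths.foldl pvStepA PySem.Dict.empty
  -- {start: len(peaks) for start, peaks in start_to_peaks.items()}
  (start_to_peaks.items.map (fun kv => (kv.1, (PySem.Set.len kv.2 : Int)))).map
    (fun kv => (kv.1.1, kv.1.2, kv.2))

-- ===== PORT B =====
-- pairs = [(p[0], p[-1]) for p in paths if p]
def pvPairs (paths : List (List (Int × Int))) : List ((Int × Int) × (Int × Int)) :=
  paths.filterMap (fun path => match path with
    | [] => none
    | p :: ps => some (p, ps.getLast?.getD p))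

-- starts = []; for s, _ in pairs: if s not in starts: starts.append(s)
def pvStarts (pairs : List ((Int × Int) × (Int × Int))) : List (Int × Int) :=
  pairs.foldl (fun acc se => if se.1 ∈ acc then acc else acc ++ [se.1]) []

-- {e for t, e in pairs if t == s}  (a set comprehension, consumed only via len)
def pvEnds (s : Int × Int) (pairs : List ((Int × Int) × (Int × Int))) : PySem.Set (Int × Int) :=
  PySem.Set.ofList ((pairs.filter (fun te => te.1 == s)).map (fun te => te.2))

def count_unique_peaks_per_start_alt (paths : List (List (Int × Int))) : List (Int × Int × Int) :=
  let pairs := pvPairs paths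
  (pvStarts pairs).map (fun s => (s.1, s.2, (PySem.Set.len (pvEnds s pairs) : Int)))

-- ===== PRECONDITION & SPEC =====
def Spec_count_unique_peaks_per_start (paths : List (List (Int × Int))) (out : List (Int × Int × Int)) : Prop := out = count_unique_peaks_per_start_alt paths
instance (paths : List (List (Int × Int))) (out : List (Int × Int × Int)) : Decidable (Spec_count_unique_peaks_per_start paths out) := by unfold Spec_count_unique_peaks_per_start; infer_instance

-- ===== CLAIM (what is proved, stated in full; the proofs are below) =====
def Claim_equal_count_unique_peaks_per_start : Prop := ∀ (paths : List (List (Int × Int))), Dom_count_unique_peaks_per_start paths → Spec_count_unique_peaks_per_start paths (count_unique_peaks_per_start paths)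

-- ===== LEMMAS AND PROOFS =====

-- A's loop over paths is the corresponding loop over the projected pair list
def pvStepP (d : PySem.Dict (Int × Int) (PySem.Set (Int × Int)))
    (q : (Int × Int) × (Int × Int)) : PySem.Dict (Int × Int) (PySem.Set (Int × Int)) :=
  d.insert q.1 (PySem.Set.add (d.getD q.1 PySem.Set.empty) q.2)

theorem pvFoldA_eq_foldP (paths : List (List (Int × Int)))
    (d : PySem.Dict (Int × Int) (PySem.Set (Int × Int))) :
    paths.foldl pvStepA d = (pvPairs paths).foldl pvStepP d := by
  induction paths generalizing d with
  | nil => rfl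
  | cons path rest ih =>
    cases path with
    | nil => simpa [pvPairs, pvStepA] using ih d
    | cons p ps => simpa [pvPairs, pvStepA, pvStepP] using ih _

-- pvStarts is set(pairs.map fst) in first-occurrence order
theorem pvStarts_eq_ofList (pairs : List ((Int × Int) × (Int × Int))) :
    pvStarts pairs = PySem.Set.ofList (pairs.map (fun te => te.1)) := by
  rw [PySem.Set.ofList_eq_foldl, List.foldl_map]
  unfold pvStarts
  congr 1
  funext acc se
  simp [PySem.Set.add_eq_ite]

-- characterization of A's dict after the whole fold
theorem pvItems_foldP (pairs : List ((Int × Int) × (Int × Int))) :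
    ((pairs.foldl pvStepP PySem.Dict.empty).items) =
      (PySem.Set.ofList (pairs.map (fun te => te.1))).map (fun s => (s, pvEnds s pairs)) := by
  induction pairs using List.reverseRecOn with
  | nil => rfl
  | append_singleton pre q ih =>
    have hnd : (PySem.Set.ofList (pre.map (fun te => te.1))).Nodup := PySem.Set.nodup_ofList _
    have hkeysnd : (pre.foldl pvStepP PySem.Dict.empty).keys.Nodup := by
      show ((pre.foldl pvStepP PySem.Dict.empty).items.map Prod.fst).Nodup
      rw [ih, List.map_map]
      have hid : (Prod.fst ∘ fun s : Int × Int => (s, pvEnds s pre)) = id := rfl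
      rw [hid, List.map_id]
      exact hnd
    have hofl : PySem.Set.ofList ((pre ++ [q]).map (fun te => te.1)) =
        PySem.Set.add (PySem.Set.ofList (pre.map (fun te => te.1))) q.1 := by
      rw [List.map_append]
      simp only [List.map_cons, List.map_nil]
      exact PySem.Set.ofList_append_singleton _ _
    have hEnds : ∀ s : Int × Int, pvEnds s (pre ++ [q]) =
        if q.1 = s then PySem.Set.add (pvEnds s pre) q.2 else pvEnds s pre := by
      intro s
      unfold pvEnds
      rw [List.filter_append]
      by_cases h : q.1 = s
      · simp [h, PySem.Set.ofList_append_singleton]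
      · simp [h]
    rw [List.foldl_append]
    simp only [List.foldl_cons, List.foldl_nil]
    by_cases hmem : q.1 ∈ PySem.Set.ofList (pre.map (fun te => te.1))
    · -- start already present: in-place update
      have hitem : (q.1, pvEnds q.1 pre) ∈ (pre.foldl pvStepP PySem.Dict.empty).items := by
        rw [ih]; exact List.mem_map_of_mem hmem
      have hget : (pre.foldl pvStepP PySem.Dict.empty).getD q.1 PySem.Set.empty = pvEnds q.1 pre :=
        PySem.Dict.getD_of_mem_items _ hitem hkeysnd _
      have hcont : (pre.foldl pvStepP PySem.Dict.empty).contains q.1 = true := by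
        rw [PySem.Dict.contains_eq_decide_mem_keys]
        have : q.1 ∈ (pre.foldl pvStepP PySem.Dict.empty).keys := by
          show q.1 ∈ (pre.foldl pvStepP PySem.Dict.empty).items.map Prod.fst
          rw [ih, List.map_map]
          exact List.mem_map.mpr ⟨q.1, hmem, rfl⟩
        simpa using this
      rw [pvStepP, PySem.Dict.items_insert_of_contains _ _ hcont, ih, hget, hofl,
        PySem.Set.add_of_mem hmem, List.map_map]
      apply List.map_congr_left
      intro s hs
      rw [hEnds s]
      by_cases h : s = q.1
      · subst h; simp
      · simp [h, Ne.symm h]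
    · -- new start: appended at the end
      have hcont : (pre.foldl pvStepP PySem.Dict.empty).contains q.1 = false := by
        rw [PySem.Dict.contains_eq_decide_mem_keys]
        have : q.1 ∉ (pre.foldl pvStepP PySem.Dict.empty).keys := by
          show q.1 ∉ (pre.foldl pvStepP PySem.Dict.empty).items.map Prod.fst
          rw [ih, List.map_map]
          intro hc
          rcases List.mem_map.mp hc with ⟨x, hx, hxe⟩
          exact hmem (by simpa [← hxe] using hx)
        simpa using this
      have hget : (pre.foldl pvStepP PySem.Dict.empty).getD q.1 PySem.Set.empty = PySem.Set.empty :=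
        PySem.Dict.getD_of_not_contains _ _ hcont
      have hq1 : q.1 ∉ pre.map (fun te => te.1) := by
        rwa [← PySem.Set.mem_ofList (xs := pre.map (fun te => te.1))]
      have hEndsq : pvEnds q.1 pre = PySem.Set.empty := by
        unfold pvEnds
        have : pre.filter (fun te => te.1 == q.1) = [] := by
          rw [List.filter_eq_nil_iff]
          intro te hte hbeq
          exact hq1 (List.mem_map.mpr ⟨te, hte, by simpa using hbeq⟩)
        rw [this]; rfl
      rw [pvStepP, PySem.Dict.items_insert_of_not_contains _ _ hcont, ih, hget, hofl,
        PySem.Set.add_of_not_mem hmem, List.map_append]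
      congr 1
      · apply List.map_congr_left
        intro s hs
        have hne : ¬ (q.1 = s) := by
          rintro rfl; exact hmem hs
        rw [hEnds s, if_neg hne]
      · simp [hEnds q.1, hEndsq]

-- ===== VERDICT (by name: the statement is the Claim_ definition above) =====
theorem count_unique_peaks_per_start_spec : Claim_equal_count_unique_peaks_per_start := by
  intro paths _
  show count_unique_peaks_per_start paths = count_unique_peaks_per_start_alt paths
  simp only [count_unique_peaks_per_start, count_unique_peaks_per_start_alt,
    pvFoldA_eq_foldP, pvItems_foldP, pvStarts_eq_ofList, List.map_map]
  rfl
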